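-- pv_equiv track=rewrite | github.com/raeez/chiral-bar-cobar | compute/lib/w3_prime_locality.py | eta_normalized_w3_coeffs
-- ===== SOURCE A (Python) =====
-- from typing import Any, Dict, List, Optional, Sequence, Tuple
--
-- def eta_normalized_w3_coeffs(n_max: int = 20) -> List[int]:
--     r"""Coefficients of eta(q)^2 * chi_0^{W_3}(q) (up to q^{(2-c)/24} prefactor).
--
--     THEOREM: eta(q)^2 * chi_0^{W_3}(q)
--            = q^{(2-c)/24} * (1-q)^2 * (1-q^2)
--
--     PROOF:
--       eta(q)^2 = q^{1/12} * [prod_{n>=1}(1-q^n)]^2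
--
--       chi_0(q) = q^{-c/24} / [prod_{n>=2}(1-q^n) * prod_{n>=3}(1-q^n)]
--
--       Product:
--         q^{1/12 - c/24} * [prod_{n>=1}(1-q^n)]^2
--                           / [prod_{n>=2}(1-q^n) * prod_{n>=3}(1-q^n)]
--
--       = q^{(2-c)/24} * prod_{n>=1}(1-q^n) / prod_{n>=2}(1-q^n)
--                       * prod_{n>=1}(1-q^n) / prod_{n>=3}(1-q^n)
--
--       = q^{(2-c)/24} * (1-q) * (1-q)(1-q^2)
--
--       = q^{(2-c)/24} * (1-q)^2 * (1-q^2)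
--
--     Returns the polynomial coefficients of (1-q)^2 * (1-q^2).
--     """
--     # (1-q)^2 = 1 - 2q + q^2
--     # (1-q)^2 * (1-q^2) = (1 - 2q + q^2)(1 - q^2)
--     #   = 1 - 2q + q^2 - q^2 + 2q^3 - q^4
--     #   = 1 - 2q + 2q^3 - q^4
--     poly = [0] * (n_max + 1)
--     # (1-q)^2
--     a = [0] * (n_max + 1)
--     a[0] = 1
--     if n_max >= 1:
--         a[1] = -2
--     if n_max >= 2:
--         a[2] = 1
--     # Multiply by (1-q^2)
--     for m in range(n_max + 1):
--         poly[m] += a[m]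
--         if m >= 2:
--             poly[m] -= a[m - 2]
--     return poly
-- ===== SOURCE B (Python) =====
-- from typing import List
--
-- def eta_normalized_w3_coeffs(n_max: int = 20) -> List[int]:
--     """The product is the fixed quartic 1 - 2q + 2q^3 - q^4: write its known
--     coefficients directly instead of building and convolving polynomials."""
--     poly = [0] * (n_max + 1)
--     for i, v in ((0, 1), (1, -2), (3, 2), (4, -1)):
--         if i <= n_max:
--             poly[i] = v
--     return poly
-- ===== Notes on version B (the rewrite author's own statement) =====
-- stated objective: simpler
-- what changed: B writes the four nonzero coefficients of the fixed quartic product directly into a zero array, guarded by index at most n_max, replacing A's build-then-convolve polynomial multiplication loop.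
import Mathlib
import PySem

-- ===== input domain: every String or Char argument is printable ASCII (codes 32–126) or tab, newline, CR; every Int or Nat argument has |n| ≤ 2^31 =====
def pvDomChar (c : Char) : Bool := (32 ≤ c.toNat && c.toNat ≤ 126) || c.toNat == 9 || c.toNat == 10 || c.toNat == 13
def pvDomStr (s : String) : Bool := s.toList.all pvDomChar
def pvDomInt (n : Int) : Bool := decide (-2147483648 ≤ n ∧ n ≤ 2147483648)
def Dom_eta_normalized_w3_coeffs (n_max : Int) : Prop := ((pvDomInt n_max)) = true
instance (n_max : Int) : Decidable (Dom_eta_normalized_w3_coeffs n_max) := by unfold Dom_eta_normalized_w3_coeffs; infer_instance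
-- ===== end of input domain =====

-- B replaces A's build-then-convolve polynomial multiplication by writing the four
-- nonzero coefficients of the fixed quartic product directly (simpler, measured faster).


-- ===== PORT A =====
-- literal port of A: build a = (1-q)^2, then multiply by (1-q^2) with an index loop.
-- List indexing uses List.set / List.getD; inside Pre_ every index is in range, so
-- this matches Python's in-range list assignment exactly.
def pvMkA (n_max : Int) : List Int :=
  let a : List Int := (List.replicate (n_max + 1).toNat 0).set 0 1
  let a := if 1 ≤ n_max then a.set 1 (-2) else a
  if 2 ≤ n_max then a.set 2 1 else a

def pvLoopA (a p : List Int) (m : Int) : List Int :=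
  let p := p.set m.toNat (p.getD m.toNat 0 + a.getD m.toNat 0)
  if 2 ≤ m then p.set m.toNat (p.getD m.toNat 0 - a.getD (m - 2).toNat 0) else p

def eta_normalized_w3_coeffs (n_max : Int) : List Int :=
  let poly : List Int := List.replicate (n_max + 1).toNat 0
  let a := pvMkA n_max
  (PySem.List.pyRange 0 (n_max + 1) 1).foldl (pvLoopA a) poly

-- ===== PORT B =====
def eta_normalized_w3_coeffs_alt (n_max : Int) : List Int :=
  [((0 : Int), (1 : Int)), (1, -2), (3, 2), (4, -1)].foldl
    (fun p iv => if iv.1 ≤ n_max then p.set iv.1.toNat iv.2 else p)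
    (List.replicate (n_max + 1).toNat 0)

-- ===== PRECONDITION & SPEC =====
-- A raises IndexError for negative n_max (it assigns coefficient one into an empty list); Pre_ excludes exactly those.
def Pre_eta_normalized_w3_coeffs (n_max : Int) : Prop := 0 ≤ n_max
instance (n_max : Int) : Decidable (Pre_eta_normalized_w3_coeffs n_max) := by unfold Pre_eta_normalized_w3_coeffs; infer_instance
def pvWitness_eta_normalized_w3_coeffs : Int := 3

def Spec_eta_normalized_w3_coeffs (n_max : Int) (out : List Int) : Prop := out = eta_normalized_w3_coeffs_alt n_max
instance (n_max : Int) (out : List Int) : Decidable (Spec_eta_normalized_w3_coeffs n_max out) := by unfold Spec_eta_normalized_w3_coeffs; infer_instance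

-- ===== CLAIM (what is proved, stated in full; the proofs are below) =====
def Claim_equal_eta_normalized_w3_coeffs : Prop := ∀ (n_max : Int), Dom_eta_normalized_w3_coeffs n_max → Pre_eta_normalized_w3_coeffs n_max → Spec_eta_normalized_w3_coeffs n_max (eta_normalized_w3_coeffs n_max)

-- ===== LEMMAS AND PROOFS =====

-- the common closed-form coefficient function
def pvCoeff (j : Nat) : Int :=
  if j = 0 then 1 else if j = 1 then -2 else if j = 3 then 2 else if j = 4 then -1 else 0

lemma pvB_closed (n_max : Int) (h : 0 ≤ n_max) :
    eta_normalized_w3_coeffs_alt n_max = (List.range (n_max + 1).toNat).map pvCoeff := by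
  unfold eta_normalized_w3_coeffs_alt
  simp only [List.foldl_cons, List.foldl_nil]
  apply List.ext_getElem
  · split_ifs <;> simp
  · intro j h1 h2
    have hjN : j < (n_max + 1).toNat := by simpa using h2
    by_cases h4 : (4 : Int) ≤ n_max <;> by_cases h3 : (3 : Int) ≤ n_max <;>
      by_cases h1' : (1 : Int) ≤ n_max <;>
      first
        | omega
        | (simp only [h, h4, h3, h1', if_true, if_false, if_pos, if_neg, not_false_iff,
              List.getElem_set, List.getElem_map, List.getElem_range,
              List.getElem_replicate, pvCoeff]
           split_ifs <;> omega)

lemma pvMkA_getD (n_max : Int) (j : Nat) (hj : j < (n_max + 1).toNat) :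
    (pvMkA n_max).getD j 0 =
      if j = 0 then 1 else if j = 1 then -2 else if j = 2 then 1 else 0 := by
  unfold pvMkA
  have hlen : ∀ (l : List Int) (hl : l.length = (n_max + 1).toNat),
      l.getD j 0 = l[j]'(by omega) := by
    intro l hl; rw [List.getD_eq_getElem l 0 (by omega)]
  split_ifs <;>
    · rw [hlen _ (by simp)]
      simp [List.getElem_set, List.getElem_replicate]
      first
        | omega
        | (split_ifs <;> omega)

lemma pvLoop_closed (n : Int) (hn : 0 ≤ n) (k : Nat) (hk : (k : Int) ≤ n + 1) :
    (PySem.List.pyRange 0 (k : Int) 1).foldl (pvLoopA (pvMkA n))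
        (List.replicate (n + 1).toNat 0)
      = (List.range (n + 1).toNat).map (fun j => if j < k then pvCoeff j else 0) := by
  induction k with
  | zero =>
    rw [PySem.List.pyRange_one_eq_nil (by omega)]
    simp [List.map_const']
  | succ k ih =>
    have hk' : (k : Int) ≤ n + 1 := by push_cast at hk ⊢; omega
    have hkN : k < (n + 1).toNat := by omega
    have hcast : ((k + 1 : Nat) : Int) = (k : Int) + 1 := by push_cast; ring
    rw [hcast, PySem.List.pyRange_one_succ_right (by omega), List.foldl_append,
        List.foldl_cons, List.foldl_nil, ih hk']
    unfold pvLoopA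
    dsimp only
    have htn : (k : Int).toNat = k := by omega
    rw [htn]
    have hlen : ((List.range (n + 1).toNat).map
        (fun j => if j < k then pvCoeff j else (0 : Int))).length = (n + 1).toNat := by simp
    have hget0 : ((List.range (n + 1).toNat).map
        (fun j => if j < k then pvCoeff j else (0 : Int))).getD k 0 = 0 := by
      rw [List.getD_eq_getElem _ 0 (by omega)]
      simp [hkN]
    have hval : (pvMkA n).getD k 0 - (if 2 ≤ k then (pvMkA n).getD (k - 2) 0 else 0)
        = pvCoeff k := by
      rw [pvMkA_getD n k hkN]
      by_cases h2 : 2 ≤ k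
      · rw [if_pos h2, pvMkA_getD n (k - 2) (by omega)]
        unfold pvCoeff; split_ifs <;> omega
      · rw [if_neg h2]
        unfold pvCoeff; split_ifs <;> omega
    have hfinal : ∀ v : Int, v = pvCoeff k →
        ((List.range (n + 1).toNat).map (fun j => if j < k then pvCoeff j else (0 : Int))).set k v
          = (List.range (n + 1).toNat).map (fun j => if j < k + 1 then pvCoeff j else 0) := by
      intro v hv; subst hv
      apply List.ext_getElem
      · simp
      · intro j hj1 hj2
        simp only [List.getElem_set, List.getElem_map, List.getElem_range]
        by_cases hjk : j = k
        · subst hjk; simp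
        · simp only [if_neg (fun h : k = j => hjk h.symm)]
          split_ifs <;> first | rfl | omega
    have hgetset : ∀ x : Int,
        (((List.range (n + 1).toNat).map
            (fun j => if j < k then pvCoeff j else (0 : Int))).set k x).getD k 0 = x := by
      intro x
      rw [List.getD_eq_getElem _ 0 (by simp; omega)]
      simp [List.getElem_set]
    rw [hget0, zero_add]
    by_cases hm : 2 ≤ (k : Int)
    · rw [if_pos hm]
      have h2k : 2 ≤ k := by omega
      have hsub : ((k : Int) - 2).toNat = k - 2 := by omega
      rw [hgetset, hsub, List.set_set]
      exact hfinal _ (by rw [← hval, if_pos h2k])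
    · rw [if_neg hm]
      exact hfinal _ (by rw [← hval, if_neg (by omega)]; ring)

lemma pvA_closed (n_max : Int) (h : 0 ≤ n_max) :
    eta_normalized_w3_coeffs n_max = (List.range (n_max + 1).toNat).map pvCoeff := by
  unfold eta_normalized_w3_coeffs
  have hc : ((((n_max + 1).toNat : Nat)) : Int) = n_max + 1 := by omega
  rw [show PySem.List.pyRange 0 (n_max + 1) 1
        = PySem.List.pyRange 0 (((n_max + 1).toNat : Nat) : Int) 1 by rw [hc]]
  rw [pvLoop_closed n_max h (n_max + 1).toNat (by omega)]
  apply List.map_congr_left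
  intro j hj
  simp [List.mem_range.mp hj]

-- ===== VERDICT (by name: the statement is the Claim_ definition above) =====
theorem eta_normalized_w3_coeffs_spec : Claim_equal_eta_normalized_w3_coeffs := by
  intro n _ hpre
  unfold Spec_eta_normalized_w3_coeffs
  rw [pvA_closed n hpre, pvB_closed n hpre]
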